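-- pv_equiv track=rewrite | github.com/elan5027/CodetestWorkbook | questionsheet.py | question25_type03
-- ===== SOURCE A (Python) =====
-- def question25_type03(board):
--     answer = 0
--     bomb = []
--
--     for i, boad in enumerate(board):
--         for j in range(0, len(board)):
--             if (boad[j] == 1):
--                 bomb.append([i, j])
--
--     bomblen = (len(bomb))  # 폭탄의 갯수저장.
--     for column in range(len(board)):
--         for row in range(len(board)):
--             for i in range(0, bomblen):
--                 if bomb[i] == [column, row]:
--                     for num in range(-1, 2):
--                         numCol = (column+num) if (column +
--                                                   num) >= 0 and (column+num) < len(board) else column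
--                         numRow = (row+num) if (row+num) >= 0 and (row +
--                                                                   num) < len(board) else row
--                         onumCol = (column-num) if (column -
--                                                    num) >= 0 and (column-num) < len(board)else column
--                         board[numCol][row] = 2  # 위아래
--                         board[numCol][numRow] = 3  # 좌상 우하
--                         board[column][numRow] = 4  # 좌우
--                         board[onumCol][numRow] = 5  # 좌하 우상
--
--     for i in board:
--         for j in range(0, len(board)):
--             if (i[j] == 0):
--                 answer += 1
--     return answer
-- ===== SOURCE B (Python) =====
-- def question25_type03(board):
--     n = len(board)
--     bombs = {(i, j) for i in range(n) for j in range(n) if board[i][j] == 1}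
--     near = {(i + di, j + dj) for (i, j) in bombs
--             for di in (-1, 0, 1) for dj in (-1, 0, 1)}
--     return sum(1 for i in range(n) for j in range(n)
--                if board[i][j] == 0 and (i, j) not in near)
-- ===== Notes on version B (the rewrite author's own statement) =====
-- stated objective: faster
-- what changed: B computes the bomb set and the set of cells within Chebyshev distance 1 of any bomb once, then counts zero cells not in that set in one grid pass, instead of A's per-cell scan of the whole bomb list with a mutation loop over the board.
import Mathlib
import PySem

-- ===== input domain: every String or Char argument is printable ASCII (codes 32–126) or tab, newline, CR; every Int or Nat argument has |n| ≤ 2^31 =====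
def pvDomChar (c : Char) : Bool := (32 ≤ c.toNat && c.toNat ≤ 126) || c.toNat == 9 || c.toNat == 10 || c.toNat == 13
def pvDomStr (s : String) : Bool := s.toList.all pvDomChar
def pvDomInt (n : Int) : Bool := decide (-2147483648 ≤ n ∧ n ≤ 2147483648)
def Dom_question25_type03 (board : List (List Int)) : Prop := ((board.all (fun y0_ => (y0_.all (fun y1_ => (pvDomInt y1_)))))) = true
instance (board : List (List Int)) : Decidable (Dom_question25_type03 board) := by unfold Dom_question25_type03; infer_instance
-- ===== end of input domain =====

-- B replaces A's per-cell scan of the bomb list (with board mutation) by building the set of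
-- cells near a bomb once and counting zero cells outside it; equivalence is about the RETURN
-- value only (A mutates its argument in place, B does not).

-- ===== PORT A =====
-- board[i][j] read; boad[j] raises IndexError on short rows — excluded by Pre_
def pvRead (row : List Int) (j : Int) : Int := PySem.List.pyGetD row j 0

-- 'x if cond else d' clamp used by A for every write index
def pvClamp (n x d : Int) : Int := if x ≥ 0 ∧ x < n then x else d

-- board[i][j] = v; A's clamped indices are always in [0, len(board)), where this is exact
-- (a too-short row would be a Python IndexError, excluded by Pre_)
def pvWrite (b : List (List Int)) (i j v : Int) : List (List Int) :=
  b.modify i.toNat (fun row => row.set j.toNat v)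

def pvBombs (board : List (List Int)) : List (Int × Int) :=
  (PySem.List.enumerate board).foldl (fun acc ir =>
    (PySem.List.pyRange 0 (board.length : Int) 1).foldl (fun acc2 j =>
      if pvRead ir.2 j = 1 then acc2 ++ [(ir.1, j)] else acc2) acc) []

-- body of A's 'for num in range(-1, 2)' loop: the four writes
def pvNumStep (b : List (List Int)) (column row num : Int) : List (List Int) :=
  let n : Int := (b.length : Int)
  let numCol := pvClamp n (column + num) column
  let numRow := pvClamp n (row + num) row
  let onumCol := pvClamp n (column - num) column
  pvWrite (pvWrite (pvWrite (pvWrite b numCol row 2) numCol numRow 3) column numRow 4) onumCol numRow 5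

def pvBlast (bomb : List (Int × Int)) (b0 : List (List Int)) : List (List Int) :=
  (PySem.List.pyRange 0 (b0.length : Int) 1).foldl (fun b column =>
    (PySem.List.pyRange 0 (b.length : Int) 1).foldl (fun b row =>
      (PySem.List.pyRange 0 (bomb.length : Int) 1).foldl (fun b i =>
        if PySem.List.pyGetD bomb i ((-1 : Int), (-1 : Int)) = (column, row) then
          (PySem.List.pyRange (-1) 2 1).foldl (fun b num => pvNumStep b column row num) b
        else b) b) b) b0

def question25_type03 (board : List (List Int)) : Int :=
  let bomb := pvBombs board
  let b2 := pvBlast bomb board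
  b2.foldl (fun answer rowl =>
    (PySem.List.pyRange 0 (b2.length : Int) 1).foldl (fun a j =>
      if pvRead rowl j = 0 then a + 1 else a) answer) 0

-- ===== PORT B =====
-- board[i][j] for i, j < len(board); IndexError rows excluded by Pre_
def pvCell (board : List (List Int)) (i j : Nat) : Int := (board.getD i []).getD j 0

def pvBombsB (board : List (List Int)) : List (Int × Int) :=
  (List.range board.length).flatMap (fun i =>
    (List.range board.length).filterMap (fun j =>
      if pvCell board i j = 1 then some ((i : Int), (j : Int)) else none))

def question25_type03_alt (board : List (List Int)) : Int :=
  let n := board.length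
  let bombs : PySem.Set (Int × Int) := PySem.Set.ofList (pvBombsB board)
  let near : PySem.Set (Int × Int) := PySem.Set.ofList
    (bombs.flatMap (fun p => ([-1, 0, 1] : List Int).flatMap (fun di =>
      ([-1, 0, 1] : List Int).map (fun dj => (p.1 + di, p.2 + dj)))))
  (List.range n).foldl (fun acc i =>
    (List.range n).foldl (fun acc j =>
      if pvCell board i j = 0 ∧ PySem.Set.contains near ((i : Nat), (j : Nat)) = false
      then acc + 1 else acc) acc) 0

-- ===== PRECONDITION & SPEC =====
-- A (and B) raise IndexError when some row is shorter than the board; Pre_ excludes exactly those.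
def Pre_question25_type03 (board : List (List Int)) : Prop :=
  ∀ row ∈ board, board.length ≤ row.length
instance (board : List (List Int)) : Decidable (Pre_question25_type03 board) := by
  unfold Pre_question25_type03; infer_instance
def pvWitness_question25_type03 : List (List Int) := [[1, 0], [0, 0]]
def Spec_question25_type03 (board : List (List Int)) (out : Int) : Prop := out = question25_type03_alt board
instance (board : List (List Int)) (out : Int) : Decidable (Spec_question25_type03 board out) := by unfold Spec_question25_type03; infer_instance

-- ===== CLAIM (what is proved, stated in full; the proofs are below) =====
def Claim_equal_question25_type03 : Prop := ∀ (board : List (List Int)), Dom_question25_type03 board → Pre_question25_type03 board → Spec_question25_type03 board (question25_type03 board)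

-- ===== LEMMAS AND PROOFS =====

-- generic foldl invariants
theorem pvFoldlPres {α β : Type} (f : β → α → β) (l : List α) (I : β → Prop)
    (h : ∀ b a, a ∈ l → I b → I (f b a)) : ∀ b, I b → I (l.foldl f b) := by
  induction l with
  | nil => intro b hb; exact hb
  | cons a t ih =>
    intro b hb
    exact ih (fun b' a' ha' => h b' a' (List.mem_cons_of_mem _ ha')) _
      (h b a List.mem_cons_self hb)

theorem pvFoldlEstab {α β : Type} (f : β → α → β) (l : List α) (I G : β → Prop)
    (hI : ∀ b a, a ∈ l → I b → I (f b a))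
    (hG : ∀ b a, a ∈ l → I b → G b → G (f b a))
    (x : α) (hx : x ∈ l) (hR : ∀ b, I b → G (f b x)) :
    ∀ b, I b → G (l.foldl f b) := by
  induction l with
  | nil => cases hx
  | cons a t ih =>
    intro b hb
    by_cases hax : a = x
    · have hstep : G (f b a) := by rw [hax]; exact hR b hb
      have hIG := pvFoldlPres f t (fun b' => I b' ∧ G b')
        (fun b' a' ha' hb' => ⟨hI b' a' (List.mem_cons_of_mem _ ha') hb'.1,
          hG b' a' (List.mem_cons_of_mem _ ha') hb'.1 hb'.2⟩)
        (f b a) ⟨hI b a List.mem_cons_self hb, hstep⟩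
      exact hIG.2
    · rcases List.mem_cons.mp hx with h | h
      · exact absurd h.symm hax
      · exact ih (fun b' a' ha' => hI b' a' (List.mem_cons_of_mem _ ha'))
          (fun b' a' ha' => hG b' a' (List.mem_cons_of_mem _ ha')) h _
          (hI b a List.mem_cons_self hb)

def StructOK (n : Nat) (b : List (List Int)) : Prop :=
  b.length = n ∧ ∀ k, (hk : k < b.length) → n ≤ b[k].length

def pvNearList (board : List (List Int)) : List (Int × Int) :=
  PySem.Set.ofList ((PySem.Set.ofList (pvBombsB board)).flatMap
    (fun p => ([-1, 0, 1] : List Int).flatMap (fun di =>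
      ([-1, 0, 1] : List Int).map (fun dj => (p.1 + di, p.2 + dj)))))

def NearB (board : List (List Int)) (r c : Nat) : Prop :=
  ∃ p ∈ pvBombs board, ((r : Int) - p.1).natAbs ≤ 1 ∧ ((c : Int) - p.2).natAbs ≤ 1

theorem pvRead_eq (row : List Int) (j : Nat) : pvRead row (j : Int) = row.getD j 0 := by
  simp [pvRead, PySem.List.pyGetD_natCast]

theorem pvCell_eq_getD (board : List (List Int)) (i : Nat) (hi : i < board.length) (j : Nat) :
    pvCell board i j = board[i].getD j 0 := by
  simp [pvCell, List.getD_eq_getElem?_getD, List.getElem?_eq_getElem hi]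

theorem pvBombsInnerMem (row : List Int) (i : Int) (l : List Int) (acc : List (Int × Int))
    (p : Int × Int) :
    (p ∈ l.foldl (fun acc2 j => if pvRead row j = 1 then acc2 ++ [(i, j)] else acc2) acc) ↔
      p ∈ acc ∨ ∃ j ∈ l, pvRead row j = 1 ∧ p = (i, j) := by
  induction l generalizing acc with
  | nil => simp
  | cons a t ih =>
    simp only [List.foldl_cons]
    by_cases h : pvRead row a = 1
    · simp only [if_pos h, ih, List.mem_append, List.mem_cons, List.not_mem_nil, or_false]
      constructor
      · rintro ((hp | hp) | ⟨j, hj, h1, hp⟩)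
        · exact Or.inl hp
        · exact Or.inr ⟨a, Or.inl rfl, h, hp⟩
        · exact Or.inr ⟨j, Or.inr hj, h1, hp⟩
      · rintro (hp | ⟨j, (rfl | hj), h1, hp⟩)
        · exact Or.inl (Or.inl hp)
        · exact Or.inl (Or.inr hp)
        · exact Or.inr ⟨j, hj, h1, hp⟩
    · simp only [if_neg h, ih, List.mem_cons]
      constructor
      · rintro (hp | ⟨j, hj, h1, hp⟩)
        · exact Or.inl hp
        · exact Or.inr ⟨j, Or.inr hj, h1, hp⟩
      · rintro (hp | ⟨j, (rfl | hj), h1, hp⟩)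
        · exact Or.inl hp
        · exact absurd h1 h
        · exact Or.inr ⟨j, hj, h1, hp⟩

theorem pvBombsOuterMem (m : Int) (l : List (Int × List Int)) (acc : List (Int × Int))
    (p : Int × Int) :
    (p ∈ l.foldl (fun acc ir =>
        (PySem.List.pyRange 0 m 1).foldl (fun acc2 j =>
          if pvRead ir.2 j = 1 then acc2 ++ [(ir.1, j)] else acc2) acc) acc) ↔
      p ∈ acc ∨ ∃ ir ∈ l, ∃ j ∈ PySem.List.pyRange 0 m 1, pvRead ir.2 j = 1 ∧ p = (ir.1, j) := by
  induction l generalizing acc with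
  | nil => simp
  | cons a t ih =>
    simp only [List.foldl_cons, ih, pvBombsInnerMem, List.mem_cons]
    constructor
    · rintro ((hp | ⟨j, hj, h1, hp⟩) | ⟨ir, hir, j, hj, h1, hp⟩)
      · exact Or.inl hp
      · exact Or.inr ⟨a, Or.inl rfl, j, hj, h1, hp⟩
      · exact Or.inr ⟨ir, Or.inr hir, j, hj, h1, hp⟩
    · rintro (hp | ⟨ir, (rfl | hir), j, hj, h1, hp⟩)
      · exact Or.inl (Or.inl hp)
      · exact Or.inl (Or.inr ⟨j, hj, h1, hp⟩)
      · exact Or.inr ⟨ir, hir, j, hj, h1, hp⟩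

theorem mem_pvBombs (board : List (List Int)) (p : Int × Int) :
    p ∈ pvBombs board ↔ ∃ i j : Nat, i < board.length ∧ j < board.length ∧
      pvCell board i j = 1 ∧ p = ((i : Int), (j : Int)) := by
  unfold pvBombs
  rw [pvBombsOuterMem]
  simp only [List.not_mem_nil, false_or, PySem.List.mem_enumerate_iff, PySem.List.mem_pyRange_one]
  constructor
  · rintro ⟨ir, ⟨k, hk, rfl⟩, j, ⟨hj0, hjn⟩, h1, rfl⟩
    refine ⟨k, j.toNat, hk, by omega, ?_, by simp; omega⟩
    rw [pvCell_eq_getD board k hk j.toNat]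
    have : ((j.toNat : Nat) : Int) = j := by omega
    rw [← this] at h1
    rwa [pvRead_eq] at h1
  · rintro ⟨i, j, hi, hj, h1, rfl⟩
    refine ⟨((i : Int), board[i]), ⟨i, hi, by simp⟩, (j : Int), ⟨by omega, by omega⟩, ?_, rfl⟩
    rw [pvRead_eq, ← pvCell_eq_getD board i hi j]
    exact h1

theorem mem_pvBombsB (board : List (List Int)) (p : Int × Int) :
    p ∈ pvBombsB board ↔ ∃ i j : Nat, i < board.length ∧ j < board.length ∧
      pvCell board i j = 1 ∧ p = ((i : Int), (j : Int)) := by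
  unfold pvBombsB
  simp only [List.mem_flatMap, List.mem_filterMap, List.mem_range]
  constructor
  · rintro ⟨i, hi, j, hj, hsome⟩
    by_cases h : pvCell board i j = 1
    · rw [if_pos h] at hsome
      exact ⟨i, j, hi, hj, h, (Option.some_inj.mp hsome).symm⟩
    · rw [if_neg h] at hsome; cases hsome
  · rintro ⟨i, j, hi, hj, h1, rfl⟩
    exact ⟨i, hi, j, hj, by rw [if_pos h1]⟩

theorem pvWrite_struct (n : Nat) (b : List (List Int)) (i j v : Int)
    (hb : StructOK n b) : StructOK n (pvWrite b i j v) := by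
  obtain ⟨hlen, hrows⟩ := hb
  refine ⟨by simp [pvWrite, hlen], ?_⟩
  intro k hk
  have hk' : k < b.length := by simpa [pvWrite] using hk
  have := hrows k hk'
  simp only [pvWrite] at hk ⊢
  rw [List.getElem_modify]
  split <;> simp_all

theorem pvCell_big (b : List (List Int)) (r c : Nat) (hr : b.length ≤ r) :
    pvCell b r c = 0 := by
  simp [pvCell, List.getD_eq_getElem?_getD, List.getElem?_eq_none (by omega : b.length ≤ r)]

theorem pvCell_pvWrite (n : Nat) (b : List (List Int)) (hb : StructOK n b)
    (i j v : Int) (hi0 : 0 ≤ i) (hin : i < (n : Int)) (hj0 : 0 ≤ j) (hjn : j < (n : Int))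
    (r c : Nat) :
    pvCell (pvWrite b i j v) r c = if i = (r : Int) ∧ j = (c : Int) then v else pvCell b r c := by
  obtain ⟨hlen, hrows⟩ := hb
  by_cases hr : r < b.length
  · have hbr : n ≤ b[r].length := hrows r hr
    have hwr : r < (pvWrite b i j v).length := by simpa [pvWrite] using hr
    rw [pvCell_eq_getD _ r hwr, pvCell_eq_getD _ r hr]
    simp only [pvWrite]
    rw [List.getElem_modify]
    by_cases hir : i.toNat = r
    · rw [if_pos hir]
      have hieq : i = (r : Int) := by omega
      rw [List.getD_eq_getElem?_getD, List.getD_eq_getElem?_getD, List.getElem?_set]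
      by_cases hjc : j.toNat = c
      · have hjeq : j = (c : Int) := by omega
        rw [if_pos hjc, if_pos (by omega : j.toNat < b[r].length)]
        simp [hieq, hjeq]
      · rw [if_neg hjc]
        rw [if_neg (by intro ⟨_, h2⟩; omega)]
    · rw [if_neg hir]
      rw [if_neg (by intro ⟨h1, _⟩; omega)]
  · have h1 : pvCell (pvWrite b i j v) r c = 0 := by
      apply pvCell_big; simp [pvWrite]; omega
    have h2 : pvCell b r c = 0 := pvCell_big b r c (by omega)
    rw [h1, h2, if_neg]
    intro ⟨hir, _⟩; omega

theorem pvClamp_bounds (n x d : Int) (hd : 0 ≤ d ∧ d < n) :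
    0 ≤ pvClamp n x d ∧ pvClamp n x d < n := by
  unfold pvClamp; split_ifs <;> omega

theorem pvClamp_cases (n x d : Int) : pvClamp n x d = x ∨ pvClamp n x d = d := by
  unfold pvClamp; split_ifs <;> simp

theorem pvClamp_of_range (n x d : Int) (h : 0 ≤ x ∧ x < n) : pvClamp n x d = x := by
  unfold pvClamp; split_ifs <;> omega

theorem pvNumStep_eq (n : Nat) (b : List (List Int)) (hlen : b.length = n)
    (column row num : Int) :
    pvNumStep b column row num =
      pvWrite (pvWrite (pvWrite (pvWrite b (pvClamp n (column + num) column) row 2)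
        (pvClamp n (column + num) column) (pvClamp n (row + num) row) 3)
        column (pvClamp n (row + num) row) 4)
        (pvClamp n (column - num) column) (pvClamp n (row + num) row) 5 := by
  simp only [pvNumStep, hlen]

theorem pvNumStep_struct (n : Nat) (b : List (List Int)) (column row num : Int)
    (hb : StructOK n b) (hc : 0 ≤ column ∧ column < (n : Int)) (hr : 0 ≤ row ∧ row < (n : Int)) :
    StructOK n (pvNumStep b column row num) := by
  rw [pvNumStep_eq n b hb.1]
  exact pvWrite_struct _ _ _ _ _ (pvWrite_struct _ _ _ _ _ (pvWrite_struct _ _ _ _ _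
    (pvWrite_struct _ _ _ _ _ hb)))

theorem pvCell_pvNumStep_far (n : Nat) (b : List (List Int)) (column row num : Int)
    (hb : StructOK n b) (hc : 0 ≤ column ∧ column < (n : Int)) (hr : 0 ≤ row ∧ row < (n : Int))
    (r c : Nat)
    (hnum : -1 ≤ num ∧ num ≤ 1)
    (hfar : ¬ (((r : Int) - column).natAbs ≤ 1 ∧ ((c : Int) - row).natAbs ≤ 1)) :
    pvCell (pvNumStep b column row num) r c = pvCell b r c := by
  have hb1 := pvWrite_struct n b (pvClamp n (column + num) column) row 2 hb
  have hb2 := pvWrite_struct n _ (pvClamp n (column + num) column) (pvClamp n (row + num) row) 3 hb1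
  have hb3 := pvWrite_struct n _ column (pvClamp n (row + num) row) 4 hb2
  have hnc := pvClamp_bounds n (column + num) column hc
  have hnr := pvClamp_bounds n (row + num) row hr
  have honc := pvClamp_bounds n (column - num) column hc
  have hnc' := pvClamp_cases n (column + num) column
  have hnr' := pvClamp_cases n (row + num) row
  have honc' := pvClamp_cases n (column - num) column
  rw [pvNumStep_eq n b hb.1,
    pvCell_pvWrite n _ hb3 _ _ 5 honc.1 honc.2 hnr.1 hnr.2 r c,
    pvCell_pvWrite n _ hb2 _ _ 4 hc.1 hc.2 hnr.1 hnr.2 r c,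
    pvCell_pvWrite n _ hb1 _ _ 3 hnc.1 hnc.2 hnr.1 hnr.2 r c,
    pvCell_pvWrite n _ hb _ _ 2 hnc.1 hnc.2 hr.1 hr.2 r c]
  split_ifs <;> first | rfl | (exfalso; omega)

theorem pvCell_pvNumStep_nonzero (n : Nat) (b : List (List Int)) (column row num : Int)
    (hb : StructOK n b) (hc : 0 ≤ column ∧ column < (n : Int)) (hr : 0 ≤ row ∧ row < (n : Int))
    (r c : Nat) (h : pvCell b r c ≠ 0) :
    pvCell (pvNumStep b column row num) r c ≠ 0 := by
  have hb1 := pvWrite_struct n b (pvClamp n (column + num) column) row 2 hb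
  have hb2 := pvWrite_struct n _ (pvClamp n (column + num) column) (pvClamp n (row + num) row) 3 hb1
  have hb3 := pvWrite_struct n _ column (pvClamp n (row + num) row) 4 hb2
  have hnc := pvClamp_bounds n (column + num) column hc
  have hnr := pvClamp_bounds n (row + num) row hr
  have honc := pvClamp_bounds n (column - num) column hc
  rw [pvNumStep_eq n b hb.1,
    pvCell_pvWrite n _ hb3 _ _ 5 honc.1 honc.2 hnr.1 hnr.2 r c,
    pvCell_pvWrite n _ hb2 _ _ 4 hc.1 hc.2 hnr.1 hnr.2 r c,
    pvCell_pvWrite n _ hb1 _ _ 3 hnc.1 hnc.2 hnr.1 hnr.2 r c,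
    pvCell_pvWrite n _ hb _ _ 2 hnc.1 hnc.2 hr.1 hr.2 r c]
  split_ifs <;> omega

theorem pvCell_pvNumStep_hit (n : Nat) (b : List (List Int)) (column row num : Int)
    (hb : StructOK n b) (hc : 0 ≤ column ∧ column < (n : Int)) (hr : 0 ≤ row ∧ row < (n : Int))
    (r c : Nat) (hrn : r < n) (hcn : c < n)
    (hm : (num = (r : Int) - column ∧ (c : Int) = row) ∨
          (num = (c : Int) - row ∧ (r : Int) = column) ∨
          (num = (r : Int) - column ∧ num = (c : Int) - row) ∨
          (num = (c : Int) - row ∧ (r : Int) - column = -num)) :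
    pvCell (pvNumStep b column row num) r c ≠ 0 := by
  have hb1 := pvWrite_struct n b (pvClamp n (column + num) column) row 2 hb
  have hb2 := pvWrite_struct n _ (pvClamp n (column + num) column) (pvClamp n (row + num) row) 3 hb1
  have hb3 := pvWrite_struct n _ column (pvClamp n (row + num) row) 4 hb2
  have hnc := pvClamp_bounds n (column + num) column hc
  have hnr := pvClamp_bounds n (row + num) row hr
  have honc := pvClamp_bounds n (column - num) column hc
  rw [pvNumStep_eq n b hb.1,
    pvCell_pvWrite n _ hb3 _ _ 5 honc.1 honc.2 hnr.1 hnr.2 r c,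
    pvCell_pvWrite n _ hb2 _ _ 4 hc.1 hc.2 hnr.1 hnr.2 r c,
    pvCell_pvWrite n _ hb1 _ _ 3 hnc.1 hnc.2 hnr.1 hnr.2 r c,
    pvCell_pvWrite n _ hb _ _ 2 hnc.1 hnc.2 hr.1 hr.2 r c]
  rcases hm with ⟨h1, h2⟩ | ⟨h1, h2⟩ | ⟨h1, h2⟩ | ⟨h1, h2⟩
  · have e1 : pvClamp n (column + num) column = column + num :=
      pvClamp_of_range n _ _ (by omega)
    split_ifs <;> omega
  · have e1 : pvClamp n (row + num) row = row + num :=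
      pvClamp_of_range n _ _ (by omega)
    split_ifs <;> omega
  · have e1 : pvClamp n (column + num) column = column + num :=
      pvClamp_of_range n _ _ (by omega)
    have e2 : pvClamp n (row + num) row = row + num :=
      pvClamp_of_range n _ _ (by omega)
    split_ifs <;> omega
  · have e1 : pvClamp n (column - num) column = column - num :=
      pvClamp_of_range n _ _ (by omega)
    have e2 : pvClamp n (row + num) row = row + num :=
      pvClamp_of_range n _ _ (by omega)
    split_ifs <;> omega

theorem pvNumLoop_hit (n : Nat) (b : List (List Int)) (column row : Int)
    (hb : StructOK n b) (hc : 0 ≤ column ∧ column < (n : Int)) (hr : 0 ≤ row ∧ row < (n : Int))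
    (r c : Nat) (hrn : r < n) (hcn : c < n)
    (hnear : ((r : Int) - column).natAbs ≤ 1 ∧ ((c : Int) - row).natAbs ≤ 1) :
    pvCell ((PySem.List.pyRange (-1) 2 1).foldl (fun b num => pvNumStep b column row num) b)
      r c ≠ 0 := by
  have hrange : PySem.List.pyRange (-1) 2 1 = [-1, 0, 1] := by decide
  rw [hrange]
  simp only [List.foldl_cons, List.foldl_nil]
  have hb1 := pvNumStep_struct n b column row (-1) hb hc hr
  have hb2 := pvNumStep_struct n _ column row 0 hb1 hc hr
  have hdr : (r : Int) - column = -1 ∨ (r : Int) - column = 0 ∨ (r : Int) - column = 1 := by omega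
  have hdc : (c : Int) - row = -1 ∨ (c : Int) - row = 0 ∨ (c : Int) - row = 1 := by omega
  -- hit at the right num, then ≠ 0 is preserved by the remaining iterations
  rcases hdr with h1 | h1 | h1 <;> rcases hdc with h2 | h2 | h2
  · exact pvCell_pvNumStep_nonzero n _ column row 1 hb2 hc hr r c
      (pvCell_pvNumStep_nonzero n _ column row 0 hb1 hc hr r c
        (pvCell_pvNumStep_hit n b column row (-1) hb hc hr r c hrn hcn
          (Or.inr (Or.inr (Or.inl ⟨by omega, by omega⟩)))))
  · exact pvCell_pvNumStep_nonzero n _ column row 1 hb2 hc hr r c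
      (pvCell_pvNumStep_nonzero n _ column row 0 hb1 hc hr r c
        (pvCell_pvNumStep_hit n b column row (-1) hb hc hr r c hrn hcn
          (Or.inl ⟨by omega, by omega⟩)))
  · exact pvCell_pvNumStep_hit n _ column row 1 hb2 hc hr r c hrn hcn
      (Or.inr (Or.inr (Or.inr ⟨by omega, by omega⟩)))
  · exact pvCell_pvNumStep_nonzero n _ column row 1 hb2 hc hr r c
      (pvCell_pvNumStep_nonzero n _ column row 0 hb1 hc hr r c
        (pvCell_pvNumStep_hit n b column row (-1) hb hc hr r c hrn hcn
          (Or.inr (Or.inl ⟨by omega, by omega⟩))))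
  · exact pvCell_pvNumStep_nonzero n _ column row 1 hb2 hc hr r c
      (pvCell_pvNumStep_hit n _ column row 0 hb1 hc hr r c hrn hcn
        (Or.inl ⟨by omega, by omega⟩))
  · exact pvCell_pvNumStep_hit n _ column row 1 hb2 hc hr r c hrn hcn
      (Or.inr (Or.inl ⟨by omega, by omega⟩))
  · exact pvCell_pvNumStep_nonzero n _ column row 1 hb2 hc hr r c
      (pvCell_pvNumStep_nonzero n _ column row 0 hb1 hc hr r c
        (pvCell_pvNumStep_hit n b column row (-1) hb hc hr r c hrn hcn
          (Or.inr (Or.inr (Or.inr ⟨by omega, by omega⟩)))))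
  · exact pvCell_pvNumStep_hit n _ column row 1 hb2 hc hr r c hrn hcn
      (Or.inl ⟨by omega, by omega⟩)
  · exact pvCell_pvNumStep_hit n _ column row 1 hb2 hc hr r c hrn hcn
      (Or.inr (Or.inr (Or.inl ⟨by omega, by omega⟩)))

theorem pvBlast_far (n : Nat) (board b : List (List Int)) (bomb : List (Int × Int))
    (hbomb : ∀ p ∈ bomb, 0 ≤ p.1 ∧ p.1 < (n : Int) ∧ 0 ≤ p.2 ∧ p.2 < (n : Int))
    (hb : StructOK n b) (r c : Nat)
    (hfar : ∀ p ∈ bomb, ¬ (((r : Int) - p.1).natAbs ≤ 1 ∧ ((c : Int) - p.2).natAbs ≤ 1)) :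
    pvCell (pvBlast bomb b) r c = pvCell b r c := by
  unfold pvBlast
  have main := pvFoldlPres (β := List (List Int))
    (fun b' column => (PySem.List.pyRange 0 (b'.length : Int) 1).foldl (fun b' row =>
      (PySem.List.pyRange 0 (bomb.length : Int) 1).foldl (fun b' i =>
        if PySem.List.pyGetD bomb i ((-1 : Int), (-1 : Int)) = (column, row) then
          (PySem.List.pyRange (-1) 2 1).foldl (fun b' num => pvNumStep b' column row num) b'
        else b') b') b')
    (PySem.List.pyRange 0 (b.length : Int) 1)
    (fun b' => StructOK n b' ∧ pvCell b' r c = pvCell b r c) ?_ b ⟨hb, rfl⟩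
  · exact main.2
  intro b1 column hcol hI1
  have hcolb : 0 ≤ column ∧ column < (n : Int) := by
    have := PySem.List.mem_pyRange_one.mp hcol
    constructor <;> [exact this.1; (rw [← hb.1]; exact this.2)]
  beta_reduce
  rw [hI1.1.1]
  refine pvFoldlPres _ _ (fun b' => StructOK n b' ∧ pvCell b' r c = pvCell b r c) ?_ b1 hI1
  intro b2 row hrow hI2
  beta_reduce
  have hrowb : 0 ≤ row ∧ row < (n : Int) := PySem.List.mem_pyRange_one.mp hrow
  refine pvFoldlPres _ _ (fun b' => StructOK n b' ∧ pvCell b' r c = pvCell b r c) ?_ b2 hI2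
  intro b3 i hi hI3
  beta_reduce
  split_ifs with hifc
  · have hiR : PySem.Raise.InRange bomb.length i := by
      have := PySem.List.mem_pyRange_one.mp hi
      unfold PySem.Raise.InRange; omega
    have hq : (column, row) ∈ bomb := by
      rw [← hifc]; exact PySem.List.pyGetD_mem bomb _ hiR
    have hqb := hbomb _ hq
    have hqf := hfar _ hq
    refine pvFoldlPres _ _ (fun b' => StructOK n b' ∧ pvCell b' r c = pvCell b r c) ?_ b3 hI3
    intro b4 num hnum hI4
    beta_reduce
    have hnumb : -1 ≤ num ∧ num ≤ 1 := by
      have := PySem.List.mem_pyRange_one.mp hnum; omega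
    refine ⟨pvNumStep_struct n b4 column row num hI4.1 ⟨hqb.1, hqb.2.1⟩ ⟨hqb.2.2.1, hqb.2.2.2⟩, ?_⟩
    rw [pvCell_pvNumStep_far n b4 column row num hI4.1 ⟨hqb.1, hqb.2.1⟩ ⟨hqb.2.2.1, hqb.2.2.2⟩
      r c hnumb (by simpa using hqf)]
    exact hI4.2
  · exact hI3

theorem pvBlast_hit (n : Nat) (b : List (List Int)) (bomb : List (Int × Int))
    (hbomb : ∀ p ∈ bomb, 0 ≤ p.1 ∧ p.1 < (n : Int) ∧ 0 ≤ p.2 ∧ p.2 < (n : Int))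
    (hb : StructOK n b) (r c : Nat) (hrn : r < n) (hcn : c < n)
    (q : Int × Int) (hq : q ∈ bomb)
    (hnear : ((r : Int) - q.1).natAbs ≤ 1 ∧ ((c : Int) - q.2).natAbs ≤ 1) :
    pvCell (pvBlast bomb b) r c ≠ 0 := by
  have hqb := hbomb _ hq
  -- ≠ 0 is preserved by every iteration of every loop
  have hpresNum : ∀ (col ro : Int), 0 ≤ col ∧ col < (n : Int) → 0 ≤ ro ∧ ro < (n : Int) →
      ∀ (b' : List (List Int)), (StructOK n b' ∧ pvCell b' r c ≠ 0) →
      (StructOK n ((PySem.List.pyRange (-1) 2 1).foldl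
          (fun b'' num => pvNumStep b'' col ro num) b') ∧
        pvCell ((PySem.List.pyRange (-1) 2 1).foldl
          (fun b'' num => pvNumStep b'' col ro num) b') r c ≠ 0) := by
    intro col ro hcb hrb b' hI
    refine pvFoldlPres _ _ (fun b'' => StructOK n b'' ∧ pvCell b'' r c ≠ 0) ?_ b' hI
    intro b4 num _ hI4
    exact ⟨pvNumStep_struct n b4 col ro num hI4.1 hcb hrb,
      pvCell_pvNumStep_nonzero n b4 col ro num hI4.1 hcb hrb r c hI4.2⟩
  have hpresI : ∀ (col ro : Int), 0 ≤ col ∧ col < (n : Int) → 0 ≤ ro ∧ ro < (n : Int) →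
      ∀ (b' : List (List Int)) (i : Int), (StructOK n b' ∧ pvCell b' r c ≠ 0) →
      (StructOK n (if PySem.List.pyGetD bomb i ((-1 : Int), (-1 : Int)) = (col, ro) then
          (PySem.List.pyRange (-1) 2 1).foldl (fun b'' num => pvNumStep b'' col ro num) b'
        else b') ∧
       pvCell (if PySem.List.pyGetD bomb i ((-1 : Int), (-1 : Int)) = (col, ro) then
          (PySem.List.pyRange (-1) 2 1).foldl (fun b'' num => pvNumStep b'' col ro num) b'
        else b') r c ≠ 0) := by
    intro col ro hcb hrb b' i hI
    split_ifs
    · exact hpresNum col ro hcb hrb b' hI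
    · exact hI
  have hpresRow : ∀ (col : Int), 0 ≤ col ∧ col < (n : Int) →
      ∀ (b' : List (List Int)), (StructOK n b' ∧ pvCell b' r c ≠ 0) →
      (StructOK n ((PySem.List.pyRange 0 ((b'.length : Nat) : Int) 1).foldl (fun b2 row =>
          (PySem.List.pyRange 0 (bomb.length : Int) 1).foldl (fun b3 i =>
            if PySem.List.pyGetD bomb i ((-1 : Int), (-1 : Int)) = (col, row) then
              (PySem.List.pyRange (-1) 2 1).foldl (fun b4 num => pvNumStep b4 col row num) b3
            else b3) b2) b') ∧
       pvCell ((PySem.List.pyRange 0 ((b'.length : Nat) : Int) 1).foldl (fun b2 row =>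
          (PySem.List.pyRange 0 (bomb.length : Int) 1).foldl (fun b3 i =>
            if PySem.List.pyGetD bomb i ((-1 : Int), (-1 : Int)) = (col, row) then
              (PySem.List.pyRange (-1) 2 1).foldl (fun b4 num => pvNumStep b4 col row num) b3
            else b3) b2) b') r c ≠ 0) := by
    intro col hcb b' hI
    rw [hI.1.1]
    refine pvFoldlPres _ _ (fun b'' => StructOK n b'' ∧ pvCell b'' r c ≠ 0) ?_ b' hI
    intro b2 row hrow hI2
    beta_reduce
    have hrb : 0 ≤ row ∧ row < (n : Int) := PySem.List.mem_pyRange_one.mp hrow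
    refine pvFoldlPres _ _ (fun b'' => StructOK n b'' ∧ pvCell b'' r c ≠ 0) ?_ b2 hI2
    intro b3 i _ hI3
    exact hpresI col row hcb hrb b3 i hI3
  -- main: establish ≠ 0 at column = q.1, row = q.2, bomb index of q
  unfold pvBlast
  have main := pvFoldlEstab (β := List (List Int))
    (fun b' column => (PySem.List.pyRange 0 (b'.length : Int) 1).foldl (fun b2 row =>
      (PySem.List.pyRange 0 (bomb.length : Int) 1).foldl (fun b3 i =>
        if PySem.List.pyGetD bomb i ((-1 : Int), (-1 : Int)) = (column, row) then
          (PySem.List.pyRange (-1) 2 1).foldl (fun b4 num => pvNumStep b4 column row num) b3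
        else b3) b2) b')
    (PySem.List.pyRange 0 (b.length : Int) 1)
    (StructOK n) (fun b' => pvCell b' r c ≠ 0) ?_ ?_ q.1 ?_ ?_ b hb
  · exact main
  · -- StructOK is preserved
    intro b1 column hcol hI1
    have hcolb : 0 ≤ column ∧ column < (n : Int) := by
      have := PySem.List.mem_pyRange_one.mp hcol
      constructor <;> [exact this.1; (rw [← hb.1]; exact this.2)]
    beta_reduce
    rw [hI1.1]
    refine pvFoldlPres _ _ (StructOK n) ?_ b1 hI1
    intro b2 row hrow hI2
    beta_reduce
    have hrb : 0 ≤ row ∧ row < (n : Int) := PySem.List.mem_pyRange_one.mp hrow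
    refine pvFoldlPres _ _ (StructOK n) ?_ b2 hI2
    intro b3 i _ hI3
    beta_reduce
    split_ifs
    · refine pvFoldlPres _ _ (StructOK n) ?_ b3 hI3
      intro b4 num _ hI4
      exact pvNumStep_struct n b4 column row num hI4 hcolb hrb
    · exact hI3
  · -- ≠ 0 is preserved
    intro b1 column hcol hI1 hG1
    have hcolb : 0 ≤ column ∧ column < (n : Int) := by
      have := PySem.List.mem_pyRange_one.mp hcol
      constructor <;> [exact this.1; (rw [← hb.1]; exact this.2)]
    exact (hpresRow column hcolb b1 ⟨hI1, hG1⟩).2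
  · -- q.1 is in the column range
    rw [PySem.List.mem_pyRange_one, hb.1]
    exact ⟨hqb.1, hqb.2.1⟩
  · -- the column iteration at q.1 establishes ≠ 0
    intro b1 hI1
    beta_reduce
    rw [hI1.1]
    have hcolb : 0 ≤ q.1 ∧ q.1 < (n : Int) := ⟨hqb.1, hqb.2.1⟩
    have hrowb : 0 ≤ q.2 ∧ q.2 < (n : Int) := ⟨hqb.2.2.1, hqb.2.2.2⟩
    have main2 := pvFoldlEstab (β := List (List Int))
      (fun b2 row => (PySem.List.pyRange 0 (bomb.length : Int) 1).foldl (fun b3 i =>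
        if PySem.List.pyGetD bomb i ((-1 : Int), (-1 : Int)) = (q.1, row) then
          (PySem.List.pyRange (-1) 2 1).foldl (fun b4 num => pvNumStep b4 q.1 row num) b3
        else b3) b2)
      (PySem.List.pyRange 0 (n : Int) 1)
      (StructOK n) (fun b' => pvCell b' r c ≠ 0) ?_ ?_ q.2 ?_ ?_ b1 hI1
    · exact main2
    · intro b2 row hrow hI2
      beta_reduce
      have hrb : 0 ≤ row ∧ row < (n : Int) := PySem.List.mem_pyRange_one.mp hrow
      refine pvFoldlPres _ _ (StructOK n) ?_ b2 hI2
      intro b3 i _ hI3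
      beta_reduce
      split_ifs
      · refine pvFoldlPres _ _ (StructOK n) ?_ b3 hI3
        intro b4 num _ hI4
        exact pvNumStep_struct n b4 q.1 row num hI4 hcolb hrb
      · exact hI3
    · intro b2 row hrow hI2 hG2
      beta_reduce
      have hrb : 0 ≤ row ∧ row < (n : Int) := PySem.List.mem_pyRange_one.mp hrow
      refine (pvFoldlPres _ _ (fun b' => StructOK n b' ∧ pvCell b' r c ≠ 0) ?_ b2 ⟨hI2, hG2⟩).2
      intro b3 i _ hI3
      exact hpresI q.1 row hcolb hrb b3 i hI3
    · rw [PySem.List.mem_pyRange_one]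
      exact hrowb
    · -- the row iteration at q.2 establishes ≠ 0
      intro b2 hI2
      obtain ⟨k, hk, hbk⟩ := List.mem_iff_getElem.mp hq
      have main3 := pvFoldlEstab (β := List (List Int))
        (fun b3 i =>
          if PySem.List.pyGetD bomb i ((-1 : Int), (-1 : Int)) = (q.1, q.2) then
            (PySem.List.pyRange (-1) 2 1).foldl (fun b4 num => pvNumStep b4 q.1 q.2 num) b3
          else b3)
        (PySem.List.pyRange 0 (bomb.length : Int) 1)
        (StructOK n) (fun b' => pvCell b' r c ≠ 0) ?_ ?_ ((k : Nat) : Int) ?_ ?_ b2 hI2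
      · exact main3
      · intro b3 i _ hI3
        beta_reduce
        split_ifs
        · refine pvFoldlPres _ _ (StructOK n) ?_ b3 hI3
          intro b4 num _ hI4
          exact pvNumStep_struct n b4 q.1 q.2 num hI4 hcolb hrowb
        · exact hI3
      · intro b3 i _ hI3 hG3
        beta_reduce
        exact (hpresI q.1 q.2 hcolb hrowb b3 i ⟨hI3, hG3⟩).2
      · rw [PySem.List.mem_pyRange_one]
        constructor <;> [positivity; (push_cast; omega)]
      · intro b3 hI3
        beta_reduce
        have hget : PySem.List.pyGetD bomb ((k : Nat) : Int) ((-1 : Int), (-1 : Int)) = (q.1, q.2) := by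
          rw [PySem.List.pyGetD_natCast, List.getD_eq_getElem?_getD, List.getElem?_eq_getElem hk,
            Option.getD_some, hbk]
        rw [if_pos hget]
        exact pvNumLoop_hit n b3 q.1 q.2 hI3 hcolb hrowb r c hrn hcn hnear

theorem pvBlast_struct (n : Nat) (b : List (List Int)) (bomb : List (Int × Int))
    (hb : StructOK n b) : StructOK n (pvBlast bomb b) := by
  unfold pvBlast
  refine pvFoldlPres _ _ (StructOK n) ?_ b hb
  intro b1 column hcol hI1
  have hcolb : 0 ≤ column ∧ column < (n : Int) := by
    have := PySem.List.mem_pyRange_one.mp hcol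
    constructor <;> [exact this.1; (rw [← hb.1]; exact this.2)]
  beta_reduce
  rw [hI1.1]
  refine pvFoldlPres _ _ (StructOK n) ?_ b1 hI1
  intro b2 row hrow hI2
  beta_reduce
  have hrb : 0 ≤ row ∧ row < (n : Int) := PySem.List.mem_pyRange_one.mp hrow
  refine pvFoldlPres _ _ (StructOK n) ?_ b2 hI2
  intro b3 i _ hI3
  beta_reduce
  split_ifs
  · refine pvFoldlPres _ _ (StructOK n) ?_ b3 hI3
    intro b4 num _ hI4
    exact pvNumStep_struct n b4 column row num hI4 hcolb hrb
  · exact hI3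

theorem pvCountFoldP {α : Type} (l : List α) (p : α → Prop) [DecidablePred p] (a : Int) :
    l.foldl (fun acc x => if p x then acc + 1 else acc) a
      = a + ((l.countP (fun x => decide (p x))) : Int) := by
  induction l generalizing a with
  | nil => simp
  | cons x t ih =>
    simp only [List.foldl_cons, List.countP_cons]
    by_cases h : p x <;> simp only [h, if_pos, if_neg, decide_true, decide_false] <;>
      rw [ih] <;> simp <;> push_cast <;> ring

theorem pvNested {α β : Type} (l : List α) (inner : α → List β) (p : α → β → Prop)
    [inst : ∀ x y, Decidable (p x y)] (a : Int) :
    l.foldl (fun acc x => (inner x).foldl (fun acc y => if p x y then acc + 1 else acc) acc) a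
      = a + (l.map (fun x => (((inner x).countP (fun y => decide (p x y))) : Int))).sum := by
  induction l generalizing a with
  | nil => simp
  | cons x t ih =>
    simp only [List.foldl_cons, List.map_cons, List.sum_cons]
    rw [pvCountFoldP, ih]
    ring

theorem pvMapRows {γ : Type} (l : List (List Int)) (g : List Int → γ) :
    l.map g = (List.range l.length).map (fun r => g (l.getD r [])) := by
  apply List.ext_getElem (by simp)
  intro i h1 h2
  simp only [List.getElem_map, List.getElem_range]
  congr 1
  rw [List.getD_eq_getElem?_getD, List.getElem?_eq_getElem (by simpa using h1), Option.getD_some]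

-- ===== VERDICT (by name: the statement is the Claim_ definition above) =====
theorem question25_type03_spec : Claim_equal_question25_type03 := by
  intro board _ hpre
  unfold Spec_question25_type03
  set n := board.length with hn
  have hS0 : StructOK n board := by
    refine ⟨rfl, ?_⟩
    intro k hk
    exact hpre _ (List.getElem_mem hk)
  have hbombBounds : ∀ p ∈ pvBombs board, 0 ≤ p.1 ∧ p.1 < (n : Int) ∧ 0 ≤ p.2 ∧ p.2 < (n : Int) := by
    intro p hp
    obtain ⟨i, j, hi, hj, _, rfl⟩ := (mem_pvBombs board p).mp hp
    refine ⟨by positivity, by simp; omega, by positivity, by simp; omega⟩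
  have hB2 : StructOK n (pvBlast (pvBombs board) board) := pvBlast_struct n board _ hS0
  -- per-cell characterisation of the blasted board
  have hPC : ∀ r j : Nat, r < n → j < n →
      (pvCell (pvBlast (pvBombs board) board) r j = 0 ↔
        (pvCell board r j = 0 ∧ ¬ NearB board r j)) := by
    intro r j hr hj
    by_cases hN : NearB board r j
    · obtain ⟨q, hq, hd⟩ := hN
      have hne := pvBlast_hit n board (pvBombs board) hbombBounds hS0 r j hr hj q hq hd
      exact ⟨fun h => absurd h hne, fun h => absurd ⟨q, hq, hd⟩ h.2⟩
    · have heq := pvBlast_far n board board (pvBombs board) hbombBounds hS0 r j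
        (fun p hp hcond => hN ⟨p, hp, hcond⟩)
      rw [heq]
      exact ⟨fun h => ⟨h, hN⟩, fun h => h.1⟩
  -- the near set of B
  have hContains : ∀ i j : Nat,
      (PySem.Set.contains (pvNearList board) ((i : Int), (j : Int)) = false) ↔
        ¬ NearB board i j := by
    intro i j
    rw [← Bool.not_eq_true, PySem.Set.contains_iff, not_iff_not]
    unfold pvNearList
    rw [PySem.Set.mem_ofList, List.mem_flatMap]
    constructor
    · rintro ⟨p, hp, hmem⟩
      rw [PySem.Set.mem_ofList, mem_pvBombsB] at hp
      obtain ⟨a, b, ha, hb, h1, rfl⟩ := hp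
      simp only [List.mem_flatMap, List.mem_map] at hmem
      obtain ⟨di, hdi, dj, hdj, heq⟩ := hmem
      refine ⟨((a : Int), (b : Int)), (mem_pvBombs board _).mpr ⟨a, b, ha, hb, h1, rfl⟩, ?_⟩
      rw [Prod.mk.injEq] at heq
      simp only [List.mem_cons, List.not_mem_nil, or_false] at hdi hdj
      obtain ⟨e1, e2⟩ := heq
      constructor <;> simp only [] <;> omega
    · rintro ⟨q, hq, hd1, hd2⟩
      obtain ⟨a, b, ha, hb, h1, rfl⟩ := (mem_pvBombs board q).mp hq
      refine ⟨((a : Int), (b : Int)),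
        (PySem.Set.mem_ofList _ _).mpr ((mem_pvBombsB board _).mpr ⟨a, b, ha, hb, h1, rfl⟩), ?_⟩
      simp only [List.mem_flatMap, List.mem_map]
      simp only [] at hd1 hd2
      refine ⟨(i : Int) - (a : Int), ?_, ⟨(j : Int) - (b : Int), ?_, ?_⟩⟩
      · simp only [List.mem_cons, List.not_mem_nil, or_false]; omega
      · simp only [List.mem_cons, List.not_mem_nil, or_false]; omega
      · simp only [Prod.mk.injEq]; constructor <;> ring
  -- A as a sum of grid counts
  have eA : question25_type03 board =
      ((pvBlast (pvBombs board) board).map (fun rowl =>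
        (((PySem.List.pyRange 0 (((pvBlast (pvBombs board) board).length : Nat) : Int) 1).countP
          (fun j => decide (pvRead rowl j = 0))) : Int))).sum := by
    show ((pvBlast (pvBombs board) board).foldl (fun answer rowl =>
      (PySem.List.pyRange 0 (((pvBlast (pvBombs board) board).length : Nat) : Int) 1).foldl
        (fun a j => if pvRead rowl j = 0 then a + 1 else a) answer) 0) = _
    rw [pvNested (pvBlast (pvBombs board) board)
      (fun _ => PySem.List.pyRange 0 (((pvBlast (pvBombs board) board).length : Nat) : Int) 1)
      (fun rowl j => pvRead rowl j = 0) 0]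
    ring
  -- B as a sum of grid counts
  have eB : question25_type03_alt board =
      ((List.range n).map (fun i =>
        (((List.range n).countP (fun j => decide (pvCell board i j = 0 ∧
          PySem.Set.contains (pvNearList board) ((i : Int), (j : Int)) = false))) : Int))).sum := by
    show ((List.range n).foldl (fun acc i => (List.range n).foldl (fun acc j =>
      if pvCell board i j = 0 ∧
          PySem.Set.contains (pvNearList board) ((i : Int), (j : Int)) = false
      then acc + 1 else acc) acc) 0) = _
    rw [pvNested (List.range n) (fun _ => List.range n) _ 0]
    ring
  rw [eA, eB]
  -- rows of the blasted board → indices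
  rw [pvMapRows]
  rw [hB2.1]
  apply congrArg
  apply List.map_congr_left
  intro r hr
  rw [List.mem_range] at hr
  -- count over pyRange → count over range, then pointwise equality
  rw [PySem.List.pyRange_zero_nat, List.countP_map]
  refine congrArg _ (List.countP_congr ?_)
  intro j hj
  rw [List.mem_range] at hj
  have h1 : pvRead (((pvBlast (pvBombs board) board)).getD r []) ((j : Nat) : Int) =
      pvCell (pvBlast (pvBombs board) board) r j := by
    rw [pvRead_eq]; rfl
  simp only [Function.comp_apply, h1, decide_eq_true_eq]
  rw [hPC r j hr hj, hContains r j]
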